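-- pv_equiv track=rewrite | github.com/pypi-data/pypi-mirror-401 | packages/bpkio-cli/bpkio_cli-3.1.0-py3-none-any.whl/bpkio_cli/writers/urls.py | diff_url
-- ===== SOURCE A (Python) =====
-- def split_url(url):
--     """Splits the URL on common dividers, into segments starting with those dividers"""
--     # dividers = ["/", ".", "-", "_", "?", "&"]
--     dividers = ["/", "?", "&"]
--
--     parts = []
--     current_part = ""
--     for char in url:
--         if char in dividers:
--             if current_part:
--                 parts.append(current_part)
--                 current_part = ""
--             current_part = char
--         else:
--             current_part += char
--     if current_part:
--         parts.append(current_part)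
--     return parts
--
-- def diff_url(first, second):
--     # Split the two strings using the previously defined function
--     first_parts = split_url(first)
--     second_parts = split_url(second)
--
--     # ellipsis = " " + click.style("(⋯)", fg="black", dim=True) + " "
--     ellipsis = " (⋯) "
--
--     # Compare and construct the new array, collapsing consecutive ellipses
--     new_array = []
--     last_item = None
--     for i in range(len(second_parts)):
--         if i < len(first_parts) and second_parts[i] == first_parts[i]:
--             if last_item != ellipsis:
--                 new_array.append(ellipsis)
--                 last_item = ellipsis
--         else:
--             new_array.append(second_parts[i])
--             last_item = second_parts[i]
--
--     return "".join(new_array)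
-- ===== SOURCE B (Python) =====
-- DIVIDERS = "/?&"
--
--
-- def split_url(url):
--     """Peel off one segment at a time: the first char plus the following
--     run of non-divider characters."""
--     parts = []
--     while url:
--         j = 1
--         while j < len(url) and url[j] not in DIVIDERS:
--             j += 1
--         parts.append(url[:j])
--         url = url[j:]
--     return parts
--
--
-- def diff_url(first, second):
--     first_parts = split_url(first)
--     second_parts = split_url(second)
--
--     ellipsis = " (⋯) "
--
--     out = []
--     for i, seg in enumerate(second_parts):
--         if i < len(first_parts) and seg == first_parts[i]:
--             if out[-1:] != [ellipsis]:
--                 out.append(ellipsis)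
--         else:
--             out.append(seg)
--     return "".join(out)
-- ===== Notes on version B (the rewrite author's own statement) =====
-- stated objective: alternative
-- what changed: split_url is rewritten to peel one whole segment per step (head char plus the following non-divider run, found by an inner scan and sliced off) instead of the char-by-char accumulate/flush loop, and the diff loop drops the last_item state variable, collapsing ellipses by inspecting out[-1:] while iterating with enumerate.
import Mathlib
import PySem

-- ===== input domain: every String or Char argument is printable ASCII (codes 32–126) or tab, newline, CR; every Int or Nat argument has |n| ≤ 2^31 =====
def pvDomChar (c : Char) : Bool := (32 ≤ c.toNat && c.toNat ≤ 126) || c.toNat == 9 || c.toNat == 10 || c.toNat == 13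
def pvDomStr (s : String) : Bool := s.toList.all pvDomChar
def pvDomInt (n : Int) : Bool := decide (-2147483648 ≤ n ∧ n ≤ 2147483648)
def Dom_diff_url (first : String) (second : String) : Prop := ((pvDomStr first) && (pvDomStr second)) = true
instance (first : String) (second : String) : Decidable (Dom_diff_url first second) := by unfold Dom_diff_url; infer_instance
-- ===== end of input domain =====

-- B replaces the accumulate/flush split loop by a segment-at-a-time peel and drops the
-- last_item state in the diff loop (alternative decomposition, same cost).

-- ===== PORT A =====
def pvDividers : List Char := ['/', '?', '&']

def splitA_step (st : List (List Char) × List Char) (char : Char) :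
    List (List Char) × List Char :=
  if char ∈ pvDividers then
    ((if st.2 ≠ [] then st.1 ++ [st.2] else st.1), [char])
  else
    (st.1, st.2 ++ [char])

def splitUrlA (url : List Char) : List (List Char) :=
  let st := url.foldl splitA_step ([], [])
  if st.2 ≠ [] then st.1 ++ [st.2] else st.1

def diff_url (first : String) (second : String) : String :=
  let first_parts := splitUrlA first.toList
  let second_parts := splitUrlA second.toList
  let ell : List Char := " (⋯) ".toList
  let st := (PySem.List.pyRange 0 (second_parts.length : Int) 1).foldl
    (fun (st : List (List Char) × Option (List Char)) i =>
      if i < (first_parts.length : Int) ∧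
          PySem.List.pyGetD second_parts i [] = PySem.List.pyGetD first_parts i [] then
        (if st.2 ≠ some ell then (st.1 ++ [ell], some ell) else st)
      else
        (st.1 ++ [PySem.List.pyGetD second_parts i []],
         some (PySem.List.pyGetD second_parts i [])))
    ([], none)
  String.ofList st.1.flatten

-- ===== PORT B =====
def splitUrlB : List Char → List (List Char)
  | [] => []
  | c :: cs =>
      (c :: cs.takeWhile (fun d => !decide (d ∈ pvDividers)))
        :: splitUrlB (cs.dropWhile (fun d => !decide (d ∈ pvDividers)))
termination_by l => l.length
decreasing_by
  exact Nat.lt_succ_of_le (cs.length_dropWhile_le _)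

def diff_url_alt (first : String) (second : String) : String :=
  let first_parts := splitUrlB first.toList
  let second_parts := splitUrlB second.toList
  let ell : List Char := " (⋯) ".toList
  let out := (PySem.List.enumerate second_parts 0).foldl
    (fun (out : List (List Char)) (p : Int × List Char) =>
      if p.1 < (first_parts.length : Int) ∧ p.2 = PySem.List.pyGetD first_parts p.1 [] then
        (if out.getLast? ≠ some ell then out ++ [ell] else out)
      else out ++ [p.2]) []
  String.ofList out.flatten

-- ===== PRECONDITION & SPEC =====
def Spec_diff_url (first : String) (second : String) (out : String) : Prop := out = diff_url_alt first second
instance (first : String) (second : String) (out : String) : Decidable (Spec_diff_url first second out) := by unfold Spec_diff_url; infer_instance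

-- ===== CLAIM (what is proved, stated in full; the proofs are below) =====
def Claim_equal_diff_url : Prop := ∀ (first : String) (second : String), Dom_diff_url first second → Spec_diff_url first second (diff_url first second)

-- ===== LEMMAS AND PROOFS =====

/-- How a pending partial segment `cur` merges with the segments of the rest of the url. -/
def pvGlue (cur : List Char) (segs : List (List Char)) : List (List Char) :=
  if cur = [] then segs
  else
    match segs with
    | [] => [cur]
    | s :: ss => if s.headI ∈ pvDividers then cur :: s :: ss else (cur ++ s) :: ss

theorem glue_div {c : Char} (cs : List Char) :
    pvGlue [c] (splitUrlB cs)
      = (c :: cs.takeWhile (fun d => !decide (d ∈ pvDividers)))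
          :: splitUrlB (cs.dropWhile (fun d => !decide (d ∈ pvDividers))) := by
  cases cs with
  | nil => simp [pvGlue, splitUrlB]
  | cons d ds =>
      by_cases hd : d ∈ pvDividers
      · simp [pvGlue, splitUrlB, hd]
      · simp [pvGlue, splitUrlB, hd]

theorem glue_nondiv {c : Char} (hc : c ∉ pvDividers) (cs : List Char) (cur : List Char) :
    pvGlue (cur ++ [c]) (splitUrlB cs)
      = pvGlue cur ((c :: cs.takeWhile (fun d => !decide (d ∈ pvDividers)))
          :: splitUrlB (cs.dropWhile (fun d => !decide (d ∈ pvDividers)))) := by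
  cases cs with
  | nil =>
      cases cur with
      | nil => simp [pvGlue, splitUrlB]
      | cons x xs => simp [pvGlue, splitUrlB, hc]
  | cons d ds =>
      by_cases hd : d ∈ pvDividers
      · cases cur with
        | nil => simp [pvGlue, splitUrlB, hd]
        | cons x xs => simp [pvGlue, splitUrlB, hd, hc]
      · cases cur with
        | nil => simp [pvGlue, splitUrlB, hd]
        | cons x xs => simp [pvGlue, splitUrlB, hd, hc]

theorem splitA_loop_eq (l : List Char) :
    ∀ (parts : List (List Char)) (cur : List Char),
      (let st := l.foldl splitA_step (parts, cur)
        if st.2 ≠ [] then st.1 ++ [st.2] else st.1)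
      = parts ++ pvGlue cur (splitUrlB l) := by
  induction l with
  | nil =>
      intro parts cur
      by_cases h : cur = [] <;> simp [pvGlue, splitUrlB, h]
  | cons c cs ih =>
      intro parts cur
      by_cases hc : c ∈ pvDividers
      · have step : splitA_step (parts, cur) c
            = ((if cur ≠ [] then parts ++ [cur] else parts), [c]) := by
          simp [splitA_step, hc]
        calc (let st := (c :: cs).foldl splitA_step (parts, cur)
                if st.2 ≠ [] then st.1 ++ [st.2] else st.1)
            = (let st := cs.foldl splitA_step
                  ((if cur ≠ [] then parts ++ [cur] else parts), [c])
                if st.2 ≠ [] then st.1 ++ [st.2] else st.1) := by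
              simp only [List.foldl_cons, step]
          _ = (if cur ≠ [] then parts ++ [cur] else parts)
                ++ pvGlue [c] (splitUrlB cs) := ih _ _
          _ = parts ++ pvGlue cur (splitUrlB (c :: cs)) := by
              rw [glue_div]
              by_cases h : cur = [] <;>
                simp [splitUrlB, pvGlue, h, hc, List.append_assoc]
      · have step : splitA_step (parts, cur) c = (parts, cur ++ [c]) := by
          simp [splitA_step, hc]
        calc (let st := (c :: cs).foldl splitA_step (parts, cur)
                if st.2 ≠ [] then st.1 ++ [st.2] else st.1)
            = (let st := cs.foldl splitA_step (parts, cur ++ [c])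
                if st.2 ≠ [] then st.1 ++ [st.2] else st.1) := by
              simp only [List.foldl_cons, step]
          _ = parts ++ pvGlue (cur ++ [c]) (splitUrlB cs) := ih _ _
          _ = parts ++ pvGlue cur (splitUrlB (c :: cs)) := by
              rw [glue_nondiv hc, splitUrlB]

theorem split_eq (l : List Char) : splitUrlA l = splitUrlB l := by
  have h := splitA_loop_eq l [] []
  simpa [splitUrlA, pvGlue] using h

theorem diff_loop_eq (fp sp : List (List Char)) (ell : List Char) (idxs : List Int) :
    ∀ (arr : List (List Char)),
      (idxs.foldl
        (fun (st : List (List Char) × Option (List Char)) i =>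
          if i < (fp.length : Int) ∧
              PySem.List.pyGetD sp i [] = PySem.List.pyGetD fp i [] then
            (if st.2 ≠ some ell then (st.1 ++ [ell], some ell) else st)
          else
            (st.1 ++ [PySem.List.pyGetD sp i []], some (PySem.List.pyGetD sp i [])))
        (arr, arr.getLast?)).1
      = idxs.foldl
          (fun (out : List (List Char)) i =>
            if i < (fp.length : Int) ∧
                PySem.List.pyGetD sp i [] = PySem.List.pyGetD fp i [] then
              (if out.getLast? ≠ some ell then out ++ [ell] else out)
            else out ++ [PySem.List.pyGetD sp i []]) arr := by
  induction idxs with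
  | nil => intro arr; rfl
  | cons i is ih =>
      intro arr
      simp only [List.foldl_cons]
      by_cases hcond : i < (fp.length : Int) ∧
          PySem.List.pyGetD sp i [] = PySem.List.pyGetD fp i []
      · by_cases hlast : arr.getLast? = some ell
        · simpa [hcond, hlast] using ih arr
        · have h2 : (arr ++ [ell]).getLast? = some ell := by simp
          have := ih (arr ++ [ell])
          rw [h2] at this
          simpa [hcond, hlast] using this
      · have h2 : (arr ++ [PySem.List.pyGetD sp i []]).getLast?
            = some (PySem.List.pyGetD sp i []) := by simp
        have := ih (arr ++ [PySem.List.pyGetD sp i []])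
        rw [h2] at this
        simpa [hcond] using this

theorem diff_url_eq (first second : String) :
    diff_url first second = diff_url_alt first second := by
  simp only [diff_url, diff_url_alt, split_eq,
    PySem.List.enumerate_eq_map_pyRange (d := ([] : List Char)), List.foldl_map]
  rw [show (none : Option (List Char)) = ([] : List (List Char)).getLast? from rfl,
    diff_loop_eq]
  simp [PySem.List.len]

-- ===== VERDICT (by name: the statement is the Claim_ definition above) =====
theorem diff_url_spec : Claim_equal_diff_url := by
  intro first second _
  exact diff_url_eq first second
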